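-- pv_equiv track=rewrite | github.com/RemiErr/2026-python | weeks/week-04/solutions/1111405012/question_10008-su.py | solve
-- ===== SOURCE A (Python) =====
-- def solve(data: str) -> str:
--     lines = data.splitlines()
--     if not lines:
--         return ""
--     n = int(lines[0].strip() or "0")
--     count: dict[str, int] = {}
--     for i in range(1, min(n + 1, len(lines))):
--         line = lines[i].upper()
--
--         for ch in line:
--             if "A" <= ch <= "Z":
--                 count[ch] = count.get(ch, 0) + 1
--
--     items = list(count.items())
--     items.sort(key=lambda item: (-item[1], item[0]))
--
--     answer_lines: list[str] = []
--     for letter, times in items: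
--         answer_lines.append(f"{letter} {times}")
--
--     return "\n".join(answer_lines)
-- ===== SOURCE B (Python) =====
-- def solve(data: str) -> str:
--     lines = data.splitlines()
--     if not lines:
--         return ""
--     n = int(lines[0].strip() or "0")
--     stop = min(n + 1, len(lines))
--     letters = sorted(ch for line in lines[1:max(stop, 1)]
--                      for ch in line.upper() if "A" <= ch <= "Z")
--     runs: list[tuple[str, int]] = []
--     for ch in letters:
--         if runs and runs[-1][0] == ch:
--             runs[-1] = (ch, runs[-1][1] + 1)
--         else:
--             runs.append((ch, 1))
--     runs.sort(key=lambda r: (-r[1], r[0]))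
--     return "\n".join(f"{c} {k}" for c, k in runs)
-- ===== Notes on version B (the rewrite author's own statement) =====
-- stated objective: alternative
-- what changed: Replaces dictionary accumulation by a sort-then-group algorithm: collect the selected A-Z letters, sort them, run-length-encode the sorted list into (letter, run length) pairs, then sort the runs by (-count, letter).
import Mathlib
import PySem

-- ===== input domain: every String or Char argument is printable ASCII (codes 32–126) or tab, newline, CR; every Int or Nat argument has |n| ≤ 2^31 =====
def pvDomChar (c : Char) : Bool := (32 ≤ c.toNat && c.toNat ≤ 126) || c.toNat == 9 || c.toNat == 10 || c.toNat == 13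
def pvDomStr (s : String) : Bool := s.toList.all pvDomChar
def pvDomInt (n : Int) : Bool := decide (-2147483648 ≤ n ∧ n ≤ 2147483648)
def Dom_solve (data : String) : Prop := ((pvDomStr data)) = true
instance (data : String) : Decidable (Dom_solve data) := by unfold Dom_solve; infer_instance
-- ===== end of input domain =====

-- B uses a different algorithm: it sorts the selected A-Z letters, run-length-encodes the sorted
-- list into (letter, run length) pairs, and sorts the runs by (-count, letter) — no counting dict.

-- ===== PORT A =====
def solve (data : String) : String :=
  let lines := PySem.Str.splitlines data
  if lines = [] then "" else
    let s := PySem.Str.strip (PySem.List.pyGetD lines 0 "")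
    (PySem.Int.ofStr? (if s = "" then "0" else s)).elim
      ""   -- int(...) raises ValueError here; excluded by Pre_solve
      (fun n =>
      let count : PySem.Dict Char Int :=
        (PySem.List.pyRange 1 (min (n + 1) (PySem.List.len lines))).foldl
          (fun d i =>
            (PySem.Str.upper (PySem.List.pyGetD lines i "")).toList.foldl
              (fun d ch => if 'A' ≤ ch ∧ ch ≤ 'Z' then d.insert ch (d.getD ch 0 + 1) else d) d)
          PySem.Dict.empty
      let items := PySem.List.sorted2 count.items (fun p => -p.2) (fun p => p.1)
      PySem.Str.join "\n" (items.map (fun p => String.ofList ([p.1, ' '] ++ PySem.Int.toChars p.2))))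

-- ===== PORT B =====
-- one step of B's run-length-encoding loop: extend the last run or start a new one
def rleStep (runs : List (Char × Int)) (ch : Char) : List (Char × Int) :=
  match runs.getLast? with
  | some r => if r.1 = ch then runs.dropLast ++ [(ch, r.2 + 1)] else runs ++ [(ch, 1)]
  | none => runs ++ [(ch, 1)]

def solve_alt (data : String) : String :=
  let lines := PySem.Str.splitlines data
  if lines = [] then "" else
    let s := PySem.Str.strip (PySem.List.pyGetD lines 0 "")
    (PySem.Int.ofStr? (if s = "" then "0" else s)).elim
      ""   -- int(...) raises ValueError here; excluded by Pre_solve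
      (fun n =>
      let stop := min (n + 1) (PySem.List.len lines)
      let letters := PySem.List.sorted
        (((PySem.List.slice lines (some 1) (some (max stop 1))).map
            (fun l => (PySem.Str.upper l).toList.filter
              (fun ch => decide ('A' ≤ ch ∧ ch ≤ 'Z')))).flatten)
        (fun c => c)
      let runs := letters.foldl rleStep []
      let sorted := PySem.List.sorted2 runs (fun p => -p.2) (fun p => p.1)
      PySem.Str.join "\n" (sorted.map (fun p => String.ofList ([p.1, ' '] ++ PySem.Int.toChars p.2))))

-- ===== PRECONDITION & SPEC =====
-- Pre_ excludes exactly the inputs whose stripped first line is non-empty yet not a valid integer literal: there int() raises ValueError in A and in B alike.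
def Pre_solve (data : String) : Prop :=
  PySem.Str.splitlines data = [] ∨
    (let s := PySem.Str.strip (PySem.List.pyGetD (PySem.Str.splitlines data) 0 "")
     (PySem.Int.ofStr? (if s = "" then "0" else s)).isSome = true)
instance (data : String) : Decidable (Pre_solve data) := by unfold Pre_solve; infer_instance
def pvWitness_solve : String := "2\nHello\nWorld"
def Spec_solve (data : String) (out : String) : Prop := out = solve_alt data
instance (data : String) (out : String) : Decidable (Spec_solve data out) := by unfold Spec_solve; infer_instance

-- ===== CLAIM (what is proved, stated in full; the proofs are below) =====
def Claim_equal_solve : Prop := ∀ (data : String), Dom_solve data → Pre_solve data → Spec_solve data (solve data)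

-- ===== LEMMAS AND PROOFS =====

-- the selected lines, the uppercased selected text, and its A–Z letters
def selOf (lines : List String) (n : Int) : List String :=
  (lines.drop 1).take ((max (min (n + 1) (PySem.List.len lines)) 1).toNat - 1)
def TofL (lines : List String) (n : Int) : List Char :=
  ((selOf lines n).map (fun l => (PySem.Str.upper l).toList)).flatten
def Lof (lines : List String) (n : Int) : List Char :=
  (TofL lines n).filter (fun ch => decide ('A' ≤ ch ∧ ch ≤ 'Z'))

theorem sorted2_eq_sorted_lex {α : Type} (xs : List α) (k1 : α → Int) (k2 : α → Char) :
    PySem.List.sorted2 xs k1 k2 = PySem.List.sorted xs (fun a => toLex (k1 a, k2 a)) := by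
  rw [PySem.List.sorted_eq_foldl_insertBy]
  show List.foldl _ [] xs = _
  congr 1
  funext acc x
  congr 1
  funext a b
  have h0 : (toLex (k1 a, k2 a) < toLex (k1 b, k2 b)) ↔
      (k1 a < k1 b ∨ k1 a = k1 b ∧ k2 a < k2 b) := Prod.Lex.toLex_lt_toLex
  rcases lt_trichotomy (k1 a) (k1 b) with h | h | h
  · simp [h0, h, lt_asymm h]
  · simp [h, Prod.Lex.toLex_lt_toLex]
  · simp [h0, h, lt_asymm h, ne_of_gt h]

theorem sorted_congr_perm {α κ : Type} [LinearOrder κ] (xs ys : List α) (key : α → κ)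
    (hperm : xs.Perm ys) (hnd : (ys.map key).Nodup) :
    PySem.List.sorted xs key = PySem.List.sorted ys key := by
  apply PySem.List.sorted_eq_of_perm_of_pairwise_lt
  · exact (PySem.List.sorted_perm ys key false).trans hperm.symm
  · have h1 := PySem.List.sorted_pairwise ys key
    have h2 : ((PySem.List.sorted ys key).map key).Nodup :=
      (((PySem.List.sorted_perm ys key false).map key).nodup_iff).mpr hnd
    have h3 : (PySem.List.sorted ys key).Pairwise (fun a b => key a ≠ key b) :=
      List.pairwise_map.mp h2
    exact (h1.and h3).imp (fun h => lt_of_le_of_ne h.1 h.2)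

theorem foldl_pyRange_lines {δ : Type} (lines : List String) (m : Int) (hm : m ≤ (lines.length : Int))
    (g : δ → String → δ) (init : δ) :
    (PySem.List.pyRange 1 m).foldl (fun acc i => g acc (PySem.List.pyGetD lines i "")) init
    = ((lines.drop 1).take ((max m 1).toNat - 1)).foldl g init := by
  by_cases h1 : m ≤ 1
  · have hr : PySem.List.pyRange 1 m = [] := by
      rw [PySem.List.pyRange_of_pos 1 m one_pos]
      simp only [if_neg (by omega : ¬ (1 : Int) < m)]
      simp
    have ht : (max m 1).toNat - 1 = 0 := by omega
    simp [hr, ht]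
  · rw [not_le] at h1
    have step1 : (PySem.List.pyRange 1 m).foldl
          (fun acc i => g acc (PySem.List.pyGetD lines i "")) init
        = (PySem.List.pyRange 1 (PySem.List.len (lines.take m.toNat))).foldl
          (fun acc i => g acc (PySem.List.pyGetD (lines.take m.toNat) i "")) init := by
      have hlen : PySem.List.len (lines.take m.toNat) = m := by
        simp only [PySem.List.len, List.length_take]
        omega
      rw [hlen]
      apply PySem.List.foldl_congr_mem
      intro acc i hi
      obtain ⟨hi1, hi2⟩ := PySem.List.mem_pyRange_one.mp hi
      congr 1
      rw [PySem.List.pyGetD_eq_getElem _ _ (by omega) (by omega),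
          PySem.List.pyGetD_eq_getElem _ _ (by omega) (by simp; omega)]
      exact (List.getElem_take).symm
    rw [step1, PySem.List.foldl_pyRange_pyGetD (lines.take m.toNat) "" g init (by norm_num)]
    rw [List.drop_take]
    congr 2
    omega

theorem A_items (lines : List String) (n : Int) :
    ((PySem.List.pyRange 1 (min (n + 1) (PySem.List.len lines))).foldl
        (fun d i =>
          (PySem.Str.upper (PySem.List.pyGetD lines i "")).toList.foldl
            (fun d ch => if 'A' ≤ ch ∧ ch ≤ 'Z' then d.insert ch (d.getD ch 0 + 1) else d) d)
        PySem.Dict.empty).items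
    = (PySem.Set.ofList (Lof lines n)).map (fun c => (c, ((Lof lines n).count c : Int))) := by
  have hpr := foldl_pyRange_lines (δ := PySem.Dict Char Int) lines
    (min (n + 1) (PySem.List.len lines)) (by simp [PySem.List.len])
    (fun d l =>
      (PySem.Str.upper l).toList.foldl
        (fun d ch => if 'A' ≤ ch ∧ ch ≤ 'Z' then d.insert ch (d.getD ch 0 + 1) else d) d)
    PySem.Dict.empty
  beta_reduce at hpr
  rw [hpr]
  have hinner : ∀ (d : PySem.Dict Char Int) (l : String),
      (PySem.Str.upper l).toList.foldl
        (fun d ch => if 'A' ≤ ch ∧ ch ≤ 'Z' then d.insert ch (d.getD ch 0 + 1) else d) d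
      = ((PySem.Str.upper l).toList.filter (fun ch => decide ('A' ≤ ch ∧ ch ≤ 'Z'))).foldl
        (fun d ch => d.insert ch (d.getD ch 0 + 1)) d :=
    fun d l => PySem.List.foldl_ite_eq_foldl_filter _ _ _ _
  have hc : ((lines.drop 1).take ((max (min (n + 1) (PySem.List.len lines)) 1).toNat - 1)).foldl
        (fun d l =>
          (PySem.Str.upper l).toList.foldl
            (fun d ch => if 'A' ≤ ch ∧ ch ≤ 'Z' then d.insert ch (d.getD ch 0 + 1) else d) d)
        (PySem.Dict.empty : PySem.Dict Char Int)
      = PySem.Dict.counter (Lof lines n) := by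
    rw [PySem.List.foldl_congr_mem _ _ _ _ (fun d l hl => hinner d l), ← List.foldl_flatMap,
      PySem.Dict.foldl_insert_getD_add_one_eq_counter]
    congr 1
    unfold Lof TofL selOf
    rw [List.filter_flatten, List.map_map]
    rfl
  rw [hc, PySem.Dict.items_counter]

-- B's selected letters (before sorting) are exactly the A–Z letters of the selected lines
theorem B_letters_eq (lines : List String) (n : Int) :
    ((PySem.List.slice lines (some 1) (some (max (min (n + 1) (PySem.List.len lines)) 1))).map
        (fun l => (PySem.Str.upper l).toList.filter
          (fun ch => decide ('A' ≤ ch ∧ ch ≤ 'Z')))).flatten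
    = Lof lines n := by
  rw [PySem.List.slice_toNat lines (by norm_num) (by omega)]
  unfold Lof TofL selOf
  rw [List.filter_flatten, List.map_map]
  simp only [Int.toNat_one]
  rfl

theorem ofList_append_singleton {α : Type} [BEq α] [LawfulBEq α] (l : List α) (a : α) :
    PySem.Set.ofList (l ++ [a]) =
      if a ∈ PySem.Set.ofList l then PySem.Set.ofList l else PySem.Set.ofList l ++ [a] := by
  simp only [PySem.Set.ofList, List.foldl_append, List.foldl_cons, List.foldl_nil]
  simp [PySem.Set.add]

theorem getLast?_of_sorted_max (l : List Char) (h : l.Pairwise (· ≤ ·)) (a : Char)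
    (ha : a ∈ l) (hall : ∀ x ∈ l, x ≤ a) : l.getLast? = some a := by
  induction l using List.reverseRecOn with
  | nil => simp at ha
  | append_singleton l' b _ =>
    rw [List.getLast?_concat]
    have hb : b ≤ a := hall b (by simp)
    have hab : a ≤ b := by
      rcases List.mem_append.mp ha with h1 | h1
      · exact (List.pairwise_append.mp h).2.2 a h1 b (by simp)
      · simp at h1; exact le_of_eq h1
    have : b = a := le_antisymm hb hab
    simp [this]

-- B's run-length encoding of a sorted letter list produces (letter, multiplicity) pairs,
-- one per distinct letter in first-occurrence order
theorem rle_sorted (m : List Char) (h : m.Pairwise (· ≤ ·)) :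
    m.foldl rleStep [] = (PySem.Set.ofList m).map (fun c => (c, (m.count c : Int)))
      ∧ (PySem.Set.ofList m : List Char).getLast? = m.getLast? := by
  induction m using List.reverseRecOn with
  | nil => simp [PySem.Set.ofList, PySem.Set.empty_eq]
  | append_singleton m' a ih =>
    have hm' : m'.Pairwise (· ≤ ·) := (List.pairwise_append.mp h).1
    have hall : ∀ x ∈ m', x ≤ a := fun x hx => (List.pairwise_append.mp h).2.2 x hx a (by simp)
    obtain ⟨ih1, ih2⟩ := ih hm'
    rw [List.foldl_append, List.foldl_cons, List.foldl_nil, ih1]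
    by_cases ha : a ∈ m'
    · have hlast : m'.getLast? = some a := getLast?_of_sorted_max m' hm' a ha hall
      have hda : (PySem.Set.ofList m' : List Char).getLast? = some a := ih2.trans hlast
      have hset : PySem.Set.ofList (m' ++ [a]) = PySem.Set.ofList m' := by
        rw [ofList_append_singleton]; simp [PySem.Set.mem_ofList, ha]
      constructor
      · unfold rleStep
        rw [List.getLast?_map, hda]
        simp only [Option.map_some]
        obtain ⟨l0, hl0⟩ : ∃ l0, (PySem.Set.ofList m' : List Char) = l0 ++ [a] := by
          rcases List.eq_nil_or_concat (PySem.Set.ofList m' : List Char) with hnil | ⟨l0, b, hb⟩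
          · rw [hnil] at hda; simp at hda
          · rw [hb] at hda ⊢
            rw [List.concat_eq_append, List.getLast?_concat] at hda
            exact ⟨l0, by simp_all [List.concat_eq_append]⟩
        have hnd := PySem.Set.nodup_ofList m'
        rw [hl0] at hnd
        have hanotl0 : a ∉ l0 := by
          intro hx; exact (List.disjoint_of_nodup_append hnd hx) (by simp)
        rw [hset, hl0]
        rw [List.map_append, List.map_append]
        simp only [List.map_cons, List.map_nil, List.dropLast_concat, if_true]
        have e1 : List.map (fun c => (c, (List.count c m' : Int))) l0
            = List.map (fun c => (c, (List.count c (m' ++ [a]) : Int))) l0 := by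
          apply List.map_congr_left
          intro c hc
          have hcne : c ≠ a := fun he => hanotl0 (he ▸ hc)
          simp [List.count_append, List.count_singleton, Ne.symm hcne]
        have e2 : (List.count a (m' ++ [a]) : Int) = (List.count a m' : Int) + 1 := by
          simp [List.count_append]
        rw [e1, e2]
      · rw [hset, hda, List.getLast?_concat]
    · have hset : PySem.Set.ofList (m' ++ [a]) = PySem.Set.ofList m' ++ [a] := by
        rw [ofList_append_singleton]; simp [PySem.Set.mem_ofList, ha]
      constructor
      · unfold rleStep
        rw [List.getLast?_map, ih2]
        have hane : ∀ r ∈ (PySem.Set.ofList m' : List Char), ¬ (r = a) := by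
          intro r hr he; exact ha (he ▸ (PySem.Set.mem_ofList m' r).mp hr)
        rw [hset, List.map_append]
        rcases hl : m'.getLast? with _ | b
        · have : m' = [] := by cases m' <;> simp_all
          subst this
          simp [PySem.Set.ofList, PySem.Set.empty_eq]
        · have hbmem : b ∈ m' := List.mem_of_getLast? hl
          have hbne : ¬ (b = a) := fun he => ha (he ▸ hbmem)
          simp only [Option.map_some, if_neg hbne]
          simp only [List.map_cons, List.map_nil]
          have e1 : List.map (fun c => (c, (List.count c m' : Int))) (PySem.Set.ofList m')
              = List.map (fun c => (c, (List.count c (m' ++ [a]) : Int))) (PySem.Set.ofList m') := by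
            apply List.map_congr_left
            intro c hc
            have h1 : ¬ (c = a) := hane c hc
            have h2 : ¬ (a = c) := fun he => h1 (Eq.symm he)
            simp [List.count_append, List.count_singleton, h2]
          have e2 : (List.count a (m' ++ [a]) : Int) = 1 := by
            simp [List.count_append, List.count_eq_zero_of_not_mem, ha]
          rw [e1, e2]
      · rw [hset, List.getLast?_concat, List.getLast?_concat]

set_option maxHeartbeats 1000000 in
theorem sorted_items_eq (lines : List String) (n : Int) :
    PySem.List.sorted2
      ((PySem.List.pyRange 1 (min (n + 1) (PySem.List.len lines))).foldl
        (fun d i =>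
          (PySem.Str.upper (PySem.List.pyGetD lines i "")).toList.foldl
            (fun d ch => if 'A' ≤ ch ∧ ch ≤ 'Z' then d.insert ch (d.getD ch 0 + 1) else d) d)
        PySem.Dict.empty).items (fun p => -p.2) (fun p => p.1)
    = PySem.List.sorted2
        ((PySem.List.sorted
          (((PySem.List.slice lines (some 1)
              (some (max (min (n + 1) (PySem.List.len lines)) 1))).map
            (fun l => (PySem.Str.upper l).toList.filter
              (fun ch => decide ('A' ≤ ch ∧ ch ≤ 'Z')))).flatten)
          (fun c => c)).foldl rleStep [])
        (fun p => -p.2) (fun p => p.1) := by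
  rw [A_items, B_letters_eq]
  have hpw : (PySem.List.sorted (Lof lines n) (fun c => c)).Pairwise (· ≤ ·) :=
    PySem.List.sorted_pairwise (Lof lines n) (fun c => c)
  rw [(rle_sorted _ hpw).1]
  have hcnt : ∀ c : Char,
      (PySem.List.sorted (Lof lines n) (fun c => c)).count c = (Lof lines n).count c :=
    fun c => (PySem.List.sorted_perm (Lof lines n) (fun c => c) false).count_eq c
  have hmapc : (PySem.Set.ofList (PySem.List.sorted (Lof lines n) (fun c => c)) : List Char).map
        (fun c => (c, ((PySem.List.sorted (Lof lines n) (fun c => c)).count c : Int)))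
      = (PySem.Set.ofList (PySem.List.sorted (Lof lines n) (fun c => c)) : List Char).map
        (fun c => (c, ((Lof lines n).count c : Int))) := by
    apply List.map_congr_left
    intro c _
    rw [hcnt]
  rw [hmapc, sorted2_eq_sorted_lex, sorted2_eq_sorted_lex]
  apply (sorted_congr_perm _ _ _ _ _).symm
  · -- B-pairs.Perm A-pairs
    apply List.Perm.map
    rw [List.perm_ext_iff_of_nodup (PySem.Set.nodup_ofList _) (PySem.Set.nodup_ofList _)]
    intro c
    rw [PySem.Set.mem_ofList, PySem.Set.mem_ofList, PySem.List.mem_sorted]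
  · -- keys of the A-side list are distinct
    rw [List.map_map]
    apply List.Nodup.map_on
    · intro a ha b hb h
      have := congrArg (fun x => (ofLex x).2) h
      simpa using this
    · exact PySem.Set.nodup_ofList _

-- ===== VERDICT (by name: the statement is the Claim_ definition above) =====
set_option maxHeartbeats 1000000 in
theorem solve_spec : Claim_equal_solve := by
  intro data _ hpre
  show solve data = solve_alt data
  simp only [solve, solve_alt]
  by_cases hl : PySem.Str.splitlines data = []
  · rw [if_pos hl, if_pos hl]
  · rw [if_neg hl, if_neg hl]
    rcases hpre with h | h
    · exact absurd h hl
    · simp only at h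
      rcases ho : PySem.Int.ofStr? (if PySem.Str.strip
          (PySem.List.pyGetD (PySem.Str.splitlines data) 0 "") = "" then "0"
        else PySem.Str.strip (PySem.List.pyGetD (PySem.Str.splitlines data) 0 "")) with _ | n
      · rw [ho] at h; simp at h
      · simp only [Option.elim_some]
        rw [sorted_items_eq]
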